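-- pv_equiv track=rewrite | github.com/roryJenns/AOC-Solutions | 2023/day7.py | hand_summary
-- ===== SOURCE A (Python) =====
-- card_strength = ['2', '3', '4', '5', '6', '7', '8', '9', 'T', 'J', 'Q', 'K', 'A']
--
-- def hand_summary(hand):
--     cards = {}
--     for card in hand:
--         if card not in cards:
--             cards[card] = 0
--         cards[card] += 1
--
--     max_count = 0
--     second_count = 0
--     joker_count = 0
--     for card, count in cards.items():
--         if card_strength[0] == 'J' and card == "J":
--             joker_count = count
--             continue
--         if count > second_count:
--             if count > max_count:
--                 second_count = max_count
--                 max_count = count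
--             else:
--                 second_count = count
--
--     return max_count, second_count, joker_count
-- ===== SOURCE B (Python) =====
-- from collections import Counter
--
-- card_strength = ['2', '3', '4', '5', '6', '7', '8', '9', 'T', 'J', 'Q', 'K', 'A']
--
--
-- def hand_summary(hand):
--     counts = Counter(hand)
--     if card_strength[0] == 'J':
--         joker_count = counts.pop('J', 0)
--     else:
--         joker_count = 0
--     top = sorted(counts.values(), reverse=True)
--     max_count = top[0] if len(top) > 0 else 0
--     second_count = top[1] if len(top) > 1 else 0
--     return max_count, second_count, joker_count
-- ===== Notes on version B (the rewrite author's own statement) =====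
-- stated objective: simpler
-- what changed: Replaces A's hand-built membership-test counting dict and single-pass max/second-max tracking loop with collections.Counter (C-implemented counting) plus sort-descending-and-index-the-top-two, keeping the joker handling gated on the first card_strength entry as A does.
import Mathlib
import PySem

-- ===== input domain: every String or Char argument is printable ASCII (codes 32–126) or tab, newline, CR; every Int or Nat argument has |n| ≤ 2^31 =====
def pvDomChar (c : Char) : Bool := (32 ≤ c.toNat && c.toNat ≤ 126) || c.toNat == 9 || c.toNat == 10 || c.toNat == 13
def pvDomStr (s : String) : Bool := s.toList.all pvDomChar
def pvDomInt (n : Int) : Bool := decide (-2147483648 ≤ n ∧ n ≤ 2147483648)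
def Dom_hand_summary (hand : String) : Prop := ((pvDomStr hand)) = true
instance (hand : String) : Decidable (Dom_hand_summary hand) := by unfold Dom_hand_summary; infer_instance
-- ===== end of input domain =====

-- B replaces A's hand-built counting dict and single-pass top-two tracking loop with
-- Counter + sort-descending-and-take-the-first-two (objective: simpler).

-- module-level constant card_strength (shared context of both versions)
def pvCardStrength : List String :=
  ["2", "3", "4", "5", "6", "7", "8", "9", "T", "J", "Q", "K", "A"]

-- ===== PORT A =====
def hand_summary (hand : String) : Int × Int × Int :=
  -- cards = {}; for card in hand: if card not in cards: cards[card] = 0; cards[card] += 1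
  let cards : PySem.Dict Char Int :=
    hand.toList.foldl
      (fun d c =>
        let d := if d.contains c then d else d.insert c 0
        d.insert c (d.getD c 0 + 1))
      PySem.Dict.empty
  -- max_count = 0; second_count = 0; joker_count = 0; for card, count in cards.items(): …
  let st :=
    cards.items.foldl
      (fun (st : Int × Int × Int) p =>
        let (maxCount, secondCount, jokerCount) := st
        if PySem.List.pyGetD pvCardStrength 0 "" = "J" ∧ p.1 = 'J' then
          (maxCount, secondCount, p.2)          -- joker_count = count; continue
        else if p.2 > secondCount then
          if p.2 > maxCount then (p.2, maxCount, jokerCount)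
          else (maxCount, p.2, jokerCount)
        else (maxCount, secondCount, jokerCount))
      (0, 0, 0)
  st

-- ===== PORT B =====
def hand_summary_alt (hand : String) : Int × Int × Int :=
  -- counts = Counter(hand)
  let counts : PySem.Dict Char Int := PySem.Dict.counter hand.toList
  -- joker_count = counts.pop('J', 0) if card_strength[0] == 'J' else 0
  let jc : Int × PySem.Dict Char Int :=
    if PySem.List.pyGetD pvCardStrength 0 "" = "J" then
      match counts.pop? 'J' with
      | some (v, d) => (v, d)
      | none => (0, counts)
    else (0, counts)
  -- top = sorted(counts.values(), reverse=True)
  let top := PySem.List.sorted jc.2.values (fun x => x) true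
  -- max_count = top[0] if len(top) > 0 else 0; second_count = top[1] if len(top) > 1 else 0
  ((if top.length > 0 then PySem.List.pyGetD top 0 0 else 0),
   (if top.length > 1 then PySem.List.pyGetD top 1 0 else 0),
   jc.1)

-- ===== PRECONDITION & SPEC =====
def Spec_hand_summary (hand : String) (out : Int × Int × Int) : Prop := out = hand_summary_alt hand
instance (hand : String) (out : Int × Int × Int) : Decidable (Spec_hand_summary hand out) := by unfold Spec_hand_summary; infer_instance

-- ===== CLAIM (what is proved, stated in full; the proofs are below) =====
def Claim_equal_hand_summary : Prop := ∀ (hand : String), Dom_hand_summary hand → Spec_hand_summary hand (hand_summary hand)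

-- ===== LEMMAS AND PROOFS =====

-- A's counting loop builds exactly Counter(hand).
theorem pvCountsEqCounter (l : List Char) :
    l.foldl
      (fun d c =>
        let d := if d.contains c then d else d.insert c 0
        d.insert c (d.getD c 0 + 1))
      PySem.Dict.empty = PySem.Dict.counter l := by
  rw [← PySem.Dict.foldl_insert_getD_add_one_eq_counter]
  have hstep : (fun (d : PySem.Dict Char Int) c =>
      let d := if d.contains c then d else d.insert c 0
      d.insert c (d.getD c 0 + 1))
      = (fun (d : PySem.Dict Char Int) c => d.insert c (d.getD c 0 + 1)) := by
    funext d c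
    by_cases h : d.contains c
    · simp [h]
    · simp only [h, Bool.false_eq_true, if_false]
      rw [PySem.Dict.getD_insert_self, PySem.Dict.insert_insert_self,
        PySem.Dict.getD_of_not_contains (h := by simpa using h)]
  rw [hstep]

-- the canonical top-two step function (agrees with A's tracking step when snd ≤ fst)
def pvStep (st : Int × Int) (c : Int) : Int × Int := (max st.1 c, max st.2 (min st.1 c))

theorem pvStep_rc (st : Int × Int) (a b : Int) : pvStep (pvStep st a) b = pvStep (pvStep st b) a := by
  simp only [pvStep, Prod.mk.injEq]
  omega

-- A's triple fold over items, with the dead joker branch, is pvStep over the snd values with joker 0.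
theorem pvFoldItems (items : List (Char × Int)) (m s : Int) (hsm : s ≤ m) :
    items.foldl
      (fun (st : Int × Int × Int) p =>
        let (maxCount, secondCount, jokerCount) := st
        if PySem.List.pyGetD pvCardStrength 0 "" = "J" ∧ p.1 = 'J' then
          (maxCount, secondCount, p.2)
        else if p.2 > secondCount then
          if p.2 > maxCount then (p.2, maxCount, jokerCount)
          else (maxCount, p.2, jokerCount)
        else (maxCount, secondCount, jokerCount))
      (m, s, 0)
    = (((items.map (·.2)).foldl pvStep (m, s)).1,
       ((items.map (·.2)).foldl pvStep (m, s)).2, 0) := by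
  induction items generalizing m s with
  | nil => rfl
  | cons p rest ih =>
    have hdead : ¬ (PySem.List.pyGetD pvCardStrength 0 "" = "J" ∧ p.1 = 'J') := by
      intro h; exact absurd h.1 (by decide)
    have hkey : (if PySem.List.pyGetD pvCardStrength 0 "" = "J" ∧ p.1 = 'J' then
          (m, s, p.2)
        else if p.2 > s then
          if p.2 > m then (p.2, m, (0:Int))
          else (m, p.2, 0)
        else (m, s, 0))
        = ((pvStep (m, s) p.2).1, (pvStep (m, s) p.2).2, (0:Int)) := by
      rw [if_neg hdead]
      simp only [pvStep]
      split_ifs <;> simp_all <;> omega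
    simp only [List.foldl_cons, List.map_cons]
    rw [hkey]
    exact ih _ _ (by simp only [pvStep]; omega)

-- once every remaining value is at most the running second, the state is unchanged
theorem pvFoldStay (l : List Int) (m s : Int) (hsm : s ≤ m) (h : ∀ x ∈ l, x ≤ s) :
    l.foldl pvStep (m, s) = (m, s) := by
  induction l with
  | nil => rfl
  | cons a rest ih =>
    have ha : a ≤ s := h a (by simp)
    have h1 : pvStep (m, s) a = (m, s) := by
      simp only [pvStep, Prod.mk.injEq]; omega
    simp only [List.foldl_cons, h1]
    exact ih (fun x hx => h x (by simp [hx]))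

-- on a descending list of positive values the top-two fold reads off the first two entries
theorem pvFoldDesc (l : List Int) (hpos : ∀ x ∈ l, 0 < x)
    (hdesc : l.Pairwise (fun a b => b ≤ a)) :
    l.foldl pvStep (0, 0)
      = ((if l.length > 0 then PySem.List.pyGetD l 0 0 else 0),
         (if l.length > 1 then PySem.List.pyGetD l 1 0 else 0)) := by
  match l with
  | [] => rfl
  | [a] =>
    have ha : 0 < a := hpos a (by simp)
    simp only [List.foldl_cons, List.foldl_nil, pvStep, List.length_cons,
      List.length_nil, PySem.List.pyGetD_zero_cons]
    simp only [Prod.mk.injEq]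
    constructor
    · split <;> omega
    · split <;> omega
  | a :: b :: rest =>
    have ha : 0 < a := hpos a (by simp)
    have hb : 0 < b := hpos b (by simp)
    have hba : b ≤ a := (List.pairwise_cons.mp hdesc).1 b (by simp)
    have hrest : ∀ x ∈ rest, x ≤ b :=
      (List.pairwise_cons.mp (List.pairwise_cons.mp hdesc).2).1
    have h1 : pvStep (0, 0) a = (a, 0) := by
      simp only [pvStep, Prod.mk.injEq]; omega
    have h2 : pvStep (a, 0) b = (a, b) := by
      simp only [pvStep, Prod.mk.injEq]; omega
    simp only [List.foldl_cons, h1, h2, pvFoldStay rest a b hba hrest]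
    have hg0 : PySem.List.pyGetD (a :: b :: rest) 0 0 = a :=
      PySem.List.pyGetD_zero_cons _ _ _
    have hg1 : PySem.List.pyGetD (a :: b :: rest) 1 0 = b := by
      have := PySem.List.pyGetD_natCast (a :: b :: rest) 1 0
      simpa using this
    simp [hg0, hg1]

-- every value of Counter(l) is a positive count
theorem pvCounterValuesPos (l : List Char) :
    ∀ v ∈ (PySem.Dict.counter l).values, 0 < v := by
  intro v hv
  have hvals : (PySem.Dict.counter l).values
      = (PySem.Dict.counter l).items.map (·.2) := rfl
  rw [hvals, PySem.Dict.items_counter] at hv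
  simp only [List.map_map, List.mem_map] at hv
  obtain ⟨k, hk, hkv⟩ := hv
  have hmem : k ∈ l := (PySem.Set.mem_ofList l k).mp hk
  have hc : 0 < l.count k := List.count_pos_iff.mpr hmem
  simp only [Function.comp] at hkv
  omega

-- ===== VERDICT (by name: the statement is the Claim_ definition above) =====
theorem hand_summary_spec : Claim_equal_hand_summary := by
  intro hand _
  unfold Spec_hand_summary hand_summary hand_summary_alt
  dsimp only
  rw [pvCountsEqCounter, pvFoldItems _ 0 0 le_rfl]
  have hdead : ¬ (PySem.List.pyGetD pvCardStrength 0 "" = "J") := by decide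
  rw [if_neg hdead]
  set C := PySem.Dict.counter hand.toList with hC
  have hvals : C.items.map (·.2) = C.values := rfl
  rw [hvals]
  set top := PySem.List.sorted C.values (fun x => x) true with htop
  have hperm : top.Perm C.values := PySem.List.sorted_perm _ _ _
  haveI : RightCommutative pvStep := ⟨fun st a b => pvStep_rc st a b⟩
  have hfold : (C.values.foldl pvStep (0, 0)) = top.foldl pvStep (0, 0) :=
    (hperm.foldl_eq (0, 0)).symm
  have hpos : ∀ x ∈ top, 0 < x := fun x hx =>
    pvCounterValuesPos hand.toList x (hperm.mem_iff.mp hx)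
  have hdesc : top.Pairwise (fun a b => b ≤ a) :=
    PySem.List.sorted_pairwise_rev C.values (fun x => x)
  rw [hfold, pvFoldDesc top hpos hdesc]
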